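-- pv_equiv track=rewrite | github.com/Aasthaengg/IBMdataset | Python_codes/p02554/s580730994.py | solve
-- ===== SOURCE A (Python) =====
-- MOD = 10**9+7
--
-- def solve(n):
--     """
--     0: {}
--     1: {0}
--     2: {9}
--     3: {0,9}
--     """
--     dp = [[0]*4 for i in range(n+1)]
--     dp[0][0] = 1
--     for i in range(n):
--         dp[i+1][3] = (10*dp[i][3] + dp[i][2] + dp[i][1]) % MOD
--         dp[i+1][2] = (9*dp[i][2] + dp[i][0]) % MOD
--         dp[i+1][1] = (9*dp[i][1] + dp[i][0]) % MOD
--         dp[i+1][0] = (8*dp[i][0]) % MOD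
--     return dp[n][3]
-- ===== SOURCE B (Python) =====
-- MOD = 10**9+7
--
-- def solve(n):
--     # inclusion-exclusion closed form: 10^n - 2*9^n + 8^n (mod MOD)
--     return (pow(10, n, MOD) - 2 * pow(9, n, MOD) + pow(8, n, MOD)) % MOD
-- ===== Notes on version B (the rewrite author's own statement) =====
-- stated objective: faster
-- what changed: Replaces the O(n) 4-state DP table with the inclusion-exclusion closed form (10^n - 2*9^n + 8^n) mod p computed via built-in fast modular exponentiation.
import Mathlib
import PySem

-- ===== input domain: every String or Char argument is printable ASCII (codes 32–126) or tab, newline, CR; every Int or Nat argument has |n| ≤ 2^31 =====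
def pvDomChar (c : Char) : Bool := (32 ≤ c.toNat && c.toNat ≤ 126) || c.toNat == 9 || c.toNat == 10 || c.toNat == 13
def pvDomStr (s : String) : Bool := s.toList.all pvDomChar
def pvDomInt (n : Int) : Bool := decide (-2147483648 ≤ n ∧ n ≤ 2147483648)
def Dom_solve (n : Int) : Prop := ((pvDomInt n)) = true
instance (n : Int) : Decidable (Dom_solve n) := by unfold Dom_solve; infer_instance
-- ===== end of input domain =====

-- B replaces A's O(n) four-state DP with the closed form (10^n - 2*9^n + 8^n) mod p
-- via fast modular exponentiation (objective: faster, asymptotic).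


def MODC : Int := 1000000007

-- ===== PORT A =====
-- A's loop: each iteration reads only row dp[i] and writes row dp[i+1]; the port keeps the
-- current row (dp[i][0], dp[i][1], dp[i][2], dp[i][3]) as the fold state and performs the
-- same four updates in the same order; dp[n][3] is the last row's last entry.
def solveRow : Nat → (Int × Int × Int × Int) → (Int × Int × Int × Int)
  | 0, s => s
  | k+1, (d0, d1, d2, d3) =>
      solveRow k (PySem.Int.mod (8 * d0) MODC,
                  PySem.Int.mod (9 * d1 + d0) MODC,
                  PySem.Int.mod (9 * d2 + d0) MODC,
                  PySem.Int.mod (10 * d3 + d2 + d1) MODC)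

def solve (n : Int) : Int :=
  (solveRow n.toNat (1, 0, 0, 0)).2.2.2

-- ===== PORT B =====
def solve_alt (n : Int) : Int :=
  PySem.Int.mod
    (PySem.Int.powMod 10 n.toNat MODC - 2 * PySem.Int.powMod 9 n.toNat MODC
      + PySem.Int.powMod 8 n.toNat MODC) MODC

-- ===== PRECONDITION & SPEC =====
-- Pre_ excludes n < 0, on which A raises IndexError (dp is empty, dp[0][0] fails).
def Pre_solve (n : Int) : Prop := 0 ≤ n
instance (n : Int) : Decidable (Pre_solve n) := by unfold Pre_solve; infer_instance
def pvWitness_solve : Int := 3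

def Spec_solve (n : Int) (out : Int) : Prop := out = solve_alt n
instance (n : Int) (out : Int) : Decidable (Spec_solve n out) := by unfold Spec_solve; infer_instance

-- ===== CLAIM (what is proved, stated in full; the proofs are below) =====
def Claim_equal_solve : Prop := ∀ (n : Int), Dom_solve n → Pre_solve n → Spec_solve n (solve n)

-- ===== LEMMAS AND PROOFS =====

theorem MODC_pos : (0:Int) < MODC := by decide

theorem pymod_eq (a : Int) : PySem.Int.mod a MODC = a % MODC :=
  PySem.Int.mod_eq_emod_of_pos MODC_pos

-- the exact row of A's dp table after i iterations, in closed form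
def stRow (i : Nat) : Int × Int × Int × Int :=
  (8^i % MODC, (9^i - 8^i) % MODC, (9^i - 8^i) % MODC,
   (10^i - 2 * 9^i + 8^i) % MODC)

theorem modeq_self (a : Int) : Int.ModEq MODC (a % MODC) a :=
  Int.emod_emod_of_dvd a dvd_rfl

theorem solveRow_st (k i : Nat) : solveRow k (stRow i) = stRow (i + k) := by
  induction k generalizing i with
  | zero => simp [solveRow]
  | succ k ih =>
    have h0 := modeq_self ((8:Int)^i)
    have h1 := modeq_self ((9:Int)^i - 8^i)
    have h3 := modeq_self ((10:Int)^i - 2 * 9^i + 8^i)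
    have e0 : PySem.Int.mod (8 * ((8:Int)^i % MODC)) MODC = 8^(i+1) % MODC := by
      rw [pymod_eq]
      calc (8 * ((8:Int)^i % MODC)) % MODC = (8 * 8^i) % MODC := h0.mul_left 8
        _ = 8^(i+1) % MODC := by rw [show (8 * (8:Int)^i) = 8^(i+1) by ring]
    have e1 : PySem.Int.mod (9 * (((9:Int)^i - 8^i) % MODC) + (8:Int)^i % MODC) MODC
        = (9^(i+1) - 8^(i+1)) % MODC := by
      rw [pymod_eq]
      calc (9 * (((9:Int)^i - 8^i) % MODC) + (8:Int)^i % MODC) % MODC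
          = (9 * (9^i - 8^i) + 8^i) % MODC := (h1.mul_left 9).add h0
        _ = (9^(i+1) - 8^(i+1)) % MODC := by
            rw [show (9 * ((9:Int)^i - 8^i) + 8^i) = 9^(i+1) - 8^(i+1) by ring]
    have e3 : PySem.Int.mod (10 * (((10:Int)^i - 2 * 9^i + 8^i) % MODC)
          + ((9:Int)^i - 8^i) % MODC + ((9:Int)^i - 8^i) % MODC) MODC
        = (10^(i+1) - 2 * 9^(i+1) + 8^(i+1)) % MODC := by
      rw [pymod_eq]
      calc (10 * (((10:Int)^i - 2 * 9^i + 8^i) % MODC)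
            + ((9:Int)^i - 8^i) % MODC + ((9:Int)^i - 8^i) % MODC) % MODC
          = (10 * (10^i - 2 * 9^i + 8^i) + (9^i - 8^i) + (9^i - 8^i)) % MODC :=
            ((h3.mul_left 10).add h1).add h1
        _ = (10^(i+1) - 2 * 9^(i+1) + 8^(i+1)) % MODC := by
            rw [show (10 * ((10:Int)^i - 2 * 9^i + 8^i) + (9^i - 8^i) + (9^i - 8^i))
              = 10^(i+1) - 2 * 9^(i+1) + 8^(i+1) by ring]
    have hstep : solveRow (k+1) (stRow i) = solveRow k (stRow (i+1)) := by
      simp only [stRow, solveRow, e0, e1, e3]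
    rw [hstep, ih (i+1)]
    ring_nf

theorem stRow_zero : stRow 0 = (1, 0, 0, 0) := by decide

-- ===== VERDICT (by name: the statement is the Claim_ definition above) =====
theorem solve_spec : Claim_equal_solve := by
  intro n _ _
  unfold Spec_solve solve solve_alt
  rw [← stRow_zero, solveRow_st, pymod_eq]
  simp only [stRow, PySem.Int.powMod, pymod_eq, Nat.zero_add]
  have h10 := modeq_self ((10:Int)^n.toNat)
  have h9 := modeq_self ((9:Int)^n.toNat)
  have h8 := modeq_self ((8:Int)^n.toNat)
  calc ((10:Int)^n.toNat - 2 * 9^n.toNat + 8^n.toNat) % MODC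
      = ((10:Int)^n.toNat % MODC - 2 * ((9:Int)^n.toNat % MODC)
          + (8:Int)^n.toNat % MODC) % MODC :=
        (((h10.sub (h9.mul_left 2)).add h8).symm)
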